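-- pv_equiv track=rewrite | github.com/thomas-raynaud/adventofcode | 2015/day15.py | evalScore
-- ===== SOURCE A (Python) =====
-- def evalScore(igts, qts):
--     '''
--     Evaluate the score of the ingredients based on their quantities
--     '''
--     score = 1
--     nameIgts = list(igts.keys())
--     nbIgts = len(igts)
--     for i in range(4):
--         score = score * max(0,
--                             sum([igts[nameIgts[x]][i]
--                                 * qts[x] for x in range(nbIgts)]))
--     return score
-- ===== SOURCE B (Python) =====
-- def evalScore(igts, qts):
--     '''
--     Evaluate the score of the ingredients based on their quantities
--     '''
--     vals = list(igts.values())
--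
--     def go(props, acc):
--         if not props:
--             return acc
--         i = props[0]
--         t = 0
--         for x, c in enumerate(vals):
--             t += c[i] * qts[x]
--         if t <= 0:
--             return 0
--         return go(props[1:], acc * t)
--
--     return go([0, 1, 2, 3], 1)
-- ===== Notes on version B (the rewrite author's own statement) =====
-- stated objective: alternative
-- what changed: Recursive short-circuit evaluation over the property-index list: each clamped dot product is computed in turn directly from the value lists and the recursion returns 0 immediately when a factor is non-positive, instead of A's four unconditional index-based scans through the key list with dict lookups and a max(0,.) clamp per factor.
import Mathlib
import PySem

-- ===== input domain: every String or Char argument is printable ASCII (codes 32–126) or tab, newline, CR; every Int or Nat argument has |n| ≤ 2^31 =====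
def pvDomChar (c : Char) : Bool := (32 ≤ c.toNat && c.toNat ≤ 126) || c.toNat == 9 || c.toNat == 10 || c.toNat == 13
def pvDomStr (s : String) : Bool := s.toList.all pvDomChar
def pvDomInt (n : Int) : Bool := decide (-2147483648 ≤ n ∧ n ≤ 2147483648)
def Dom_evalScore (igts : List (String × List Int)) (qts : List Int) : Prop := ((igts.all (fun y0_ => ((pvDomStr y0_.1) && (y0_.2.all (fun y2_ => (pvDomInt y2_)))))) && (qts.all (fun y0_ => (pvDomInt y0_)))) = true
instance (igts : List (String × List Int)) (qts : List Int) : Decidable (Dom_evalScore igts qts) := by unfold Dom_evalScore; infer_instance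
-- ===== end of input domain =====

-- B replaces A's four unconditional key-indexed scans by a recursion over the property-index
-- list that computes each dot product from the value lists and returns 0 as soon as a factor
-- is non-positive (alternative decomposition; equal return values on Pre_).


-- ===== PORT A =====
def evalScore (igts : List (String × List Int)) (qts : List Int) : Int :=
  let igtsD := PySem.Dict.ofList igts
  let nameIgts := igtsD.keys
  let nbIgts : Int := igtsD.size
  (PySem.List.pyRange 0 4 1).foldl
    (fun score i =>
      score * max 0 (((PySem.List.pyRange 0 nbIgts 1).map
        (fun x => PySem.List.pyGetD (igtsD.getD (PySem.List.pyGetD nameIgts x "") []) i 0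
                  * PySem.List.pyGetD qts x 0)).sum)) 1

-- ===== PORT B =====
-- 'def go(props, acc)': recursion on the list of remaining property indices, early 0 return
def evalGo (vals : List (List Int)) (qts : List Int) : List Int → Int → Int
  | [], acc => acc
  | i :: rest, acc =>
    let t := (PySem.List.enumerate vals 0).foldl
      (fun s p => s + PySem.List.pyGetD p.2 i 0 * PySem.List.pyGetD qts p.1 0) 0
    if t ≤ 0 then 0 else evalGo vals qts rest (acc * t)

def evalScore_alt (igts : List (String × List Int)) (qts : List Int) : Int :=
  let vals := (PySem.Dict.ofList igts).values
  evalGo vals qts [0, 1, 2, 3] 1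

-- ===== PRECONDITION & SPEC =====
-- Pre_ excludes exactly the inputs on which A raises IndexError: fewer quantities than
-- (distinct-key) ingredients, or some effective ingredient property list shorter than 4.
def Pre_evalScore (igts : List (String × List Int)) (qts : List Int) : Prop :=
  (PySem.Dict.ofList igts).size ≤ qts.length ∧
  ∀ v ∈ (PySem.Dict.ofList igts).values, 4 ≤ v.length
instance (igts : List (String × List Int)) (qts : List Int) : Decidable (Pre_evalScore igts qts) := by unfold Pre_evalScore; infer_instance

def pvWitness_evalScore : (List (String × List Int)) × List Int :=
  ([("a", [1, 2, 3, 4]), ("b", [-1, 0, 2, 5])], [2, 3])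

def Spec_evalScore (igts : List (String × List Int)) (qts : List Int) (out : Int) : Prop := out = evalScore_alt igts qts
instance (igts : List (String × List Int)) (qts : List Int) (out : Int) : Decidable (Spec_evalScore igts qts out) := by unfold Spec_evalScore; infer_instance

-- ===== CLAIM (what is proved, stated in full; the proofs are below) =====
def Claim_equal_evalScore : Prop := ∀ (igts : List (String × List Int)) (qts : List Int), Dom_evalScore igts qts → Pre_evalScore igts qts → Spec_evalScore igts qts (evalScore igts qts)

-- ===== LEMMAS AND PROOFS =====

-- fold of running additions = sum of the mapped list
lemma foldl_add_map {α : Type} (f : α → Int) (l : List α) (a : Int) :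
    l.foldl (fun s p => s + f p) a = a + (l.map f).sum := by
  induction l generalizing a with
  | nil => simp
  | cons x xs ih => simp [ih, add_assoc]

-- A's property-i comprehension over key indices equals B's scan of the value lists.
lemma sum_eq (d : PySem.Dict String (List Int)) (hnd : d.keys.Nodup)
    (qts : List Int) (i : Int) :
    ((PySem.List.pyRange 0 (d.items.length : Int) 1).map
        (fun x => PySem.List.pyGetD (d.getD (PySem.List.pyGetD d.keys x "") []) i 0
                  * PySem.List.pyGetD qts x 0)).sum
      = (PySem.List.enumerate d.values 0).foldl
          (fun s p => s + PySem.List.pyGetD p.2 i 0 * PySem.List.pyGetD qts p.1 0) 0 := by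
  rw [foldl_add_map, zero_add]
  congr 1
  rw [PySem.List.pyRange_zero_natCast]
  apply List.ext_getElem
  · simp [PySem.List.length_enumerate, PySem.Dict.values]
  · intro k h1 h2
    simp only [List.getElem_map, List.getElem_range, PySem.List.getElem_enumerate]
    have hk : k < d.items.length := by simpa using h1
    have hkeys : PySem.List.pyGetD d.keys ((k : Nat) : Int) "" = (d.items[k]).1 := by
      rw [PySem.List.pyGetD_natCast]
      have : k < d.keys.length := by simpa [PySem.Dict.keys] using hk
      simp [PySem.Dict.keys, List.getD_eq_getElem?_getD, List.getElem?_eq_getElem hk]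
    rw [hkeys]
    have hmem : ((d.items[k]).1, (d.items[k]).2) ∈ d.items := List.getElem_mem hk
    rw [PySem.Dict.getD_of_mem_items d hmem hnd]
    simp [PySem.Dict.values]

-- fold of products from 0 stays 0
lemma foldl_mul_zero (f : Int → Int) (l : List Int) :
    l.foldl (fun a i => a * f i) 0 = 0 := by
  induction l with
  | nil => rfl
  | cons x xs ih => simpa using ih

-- B's early-exit recursion equals the clamped-product fold over the remaining properties.
lemma evalGo_eq (vals : List (List Int)) (qts : List Int) (props : List Int) :
    ∀ acc, evalGo vals qts props acc
      = props.foldl (fun a i => a * max 0 ((PySem.List.enumerate vals 0).foldl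
          (fun s p => s + PySem.List.pyGetD p.2 i 0 * PySem.List.pyGetD qts p.1 0) 0)) acc := by
  induction props with
  | nil => intro acc; rfl
  | cons i rest ih =>
      intro acc
      show (if _ ≤ 0 then (0:Int) else _) = _
      set t := (PySem.List.enumerate vals 0).foldl
          (fun s p => s + PySem.List.pyGetD p.2 i 0 * PySem.List.pyGetD qts p.1 0) 0 with ht
      simp only [List.foldl_cons]
      split_ifs with h
      · rw [max_eq_left h, mul_zero, foldl_mul_zero]
      · rw [max_eq_right ((lt_of_not_ge h).le), ih]

theorem evalScore_spec : Claim_equal_evalScore := by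
  intro igts qts _ _
  show evalScore igts qts = evalScore_alt igts qts
  unfold evalScore evalScore_alt
  have hnd := PySem.Dict.nodup_keys_ofList (κ := String) (ν := List Int) igts
  have hsz : ((PySem.Dict.ofList igts).size : Int)
      = ((PySem.Dict.ofList igts).items.length : Int) := rfl
  simp only [hsz]
  rw [evalGo_eq]
  have h4 : PySem.List.pyRange 0 4 1 = [0, 1, 2, 3] := by decide
  rw [h4]
  have hfun : ∀ i : Int,
      max (0:Int) (((PySem.List.pyRange 0 ((PySem.Dict.ofList igts).items.length : Int) 1).map
        (fun x => PySem.List.pyGetD ((PySem.Dict.ofList igts).getD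
            (PySem.List.pyGetD (PySem.Dict.ofList igts).keys x "") []) i 0
          * PySem.List.pyGetD qts x 0)).sum)
      = max 0 ((PySem.List.enumerate (PySem.Dict.ofList igts).values 0).foldl
          (fun s p => s + PySem.List.pyGetD p.2 i 0 * PySem.List.pyGetD qts p.1 0) 0) := by
    intro i; rw [sum_eq _ hnd qts i]
  simp only [List.foldl_cons, List.foldl_nil, hfun]
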